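-- pv_equiv track=rewrite | github.com/Tangled2024/cpk-analysis-tool | cpk_analysis/data_utils.py | find_strings_in_list
-- ===== SOURCE A (Python) =====
-- from typing import List, Tuple, Dict, Any, Optional
--
-- def find_strings_in_list(data_list: List[str], searching_strs: List[str]) -> Tuple[List[str], List[str]]:
--     """
--     Find specific strings in list
--
--     Parameters:
--     -----------
--     data_list : List[str]
--         List of strings to search in
--     searching_strs : List[str]
--         List of strings to search for
--
--     Returns:
--     --------
--     Tuple[List[str], List[str]]
--         Lists of matching and non-matching strings
--     """
--     metrics_with_strs = []
--     metrics_without_strs = []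
--
--     for elem in data_list:
--         if any(string in elem for string in searching_strs):
--             metrics_with_strs.append(elem)
--         else:
--             metrics_without_strs.append(elem)
--
--     return metrics_with_strs, metrics_without_strs
-- ===== SOURCE B (Python) =====
-- def find_strings_in_list(data_list, searching_strs):
--     # Partition by a hand-rolled positional multi-pattern scan: empty patterns match
--     # everything; the rest are bucketed by first character, and each element is swept
--     # once, confirming with startswith only the patterns filed under the current char.
--     pats = [(p[0], p) for p in searching_strs if p]
--     empty_hit = len(pats) != len(searching_strs)
--     by = {}
--     for p0, p in pats:
--         by.setdefault(p0, []).append(p)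
--
--     def hit(elem):
--         if empty_hit:
--             return True
--         get = by.get
--         sw = elem.startswith
--         for i in range(len(elem)):
--             b = get(elem[i])
--             if b:
--                 for p in b:
--                     if sw(p, i):
--                         return True
--         return False
--
--     return [e for e in data_list if hit(e)], [e for e in data_list if not hit(e)]
-- ===== Notes on version B (the rewrite author's own statement) =====
-- stated objective: alternative
-- what changed: B preprocesses the patterns (splitting off empty ones, which match everything, and bucketing the rest by first character into a dict), then sweeps each element position by position confirming with startswith only the bucket of the current character, and builds the partition with two filter passes instead of A's single loop with two accumulators and Python's `in` per pattern.
import Mathlib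
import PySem

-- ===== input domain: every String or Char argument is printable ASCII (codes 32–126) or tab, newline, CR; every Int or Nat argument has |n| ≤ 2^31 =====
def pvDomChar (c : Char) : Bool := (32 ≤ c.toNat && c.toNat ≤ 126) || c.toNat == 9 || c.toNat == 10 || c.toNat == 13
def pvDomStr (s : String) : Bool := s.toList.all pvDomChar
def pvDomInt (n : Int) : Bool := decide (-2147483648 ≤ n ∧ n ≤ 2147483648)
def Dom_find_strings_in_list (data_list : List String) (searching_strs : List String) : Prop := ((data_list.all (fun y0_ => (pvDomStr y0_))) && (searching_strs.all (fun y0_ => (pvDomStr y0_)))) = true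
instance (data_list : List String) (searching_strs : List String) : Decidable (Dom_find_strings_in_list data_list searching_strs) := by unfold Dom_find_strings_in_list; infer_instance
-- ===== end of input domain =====

-- B partitions with two filter passes over a hand-rolled positional multi-pattern scan
-- (empty patterns split off up front, the rest bucketed by first character in a dict)
-- instead of A's single loop with Python's `in` per pattern; objective: alternative.

-- ===== PORT A =====
def find_strings_in_list (data_list : List String) (searching_strs : List String) : List String × List String :=
  let r := data_list.foldl
    (fun (acc : List String × List String) elem =>
      if searching_strs.any (fun s => PySem.Str.isIn s elem)
      then (acc.1 ++ [elem], acc.2)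
      else (acc.1, acc.2 ++ [elem]))
    ([], [])
  (r.1, r.2)

-- ===== PORT B =====
-- elem.startswith(p, i) for 0 ≤ i ≤ len(elem) is exactly startswith on (toList.drop i);
-- p[0] of the (nonempty) filtered patterns is headD (the default is never read);
-- by.setdefault(p0, []).append(p) is Dict.modify p0 [] (· ++ [p]); by.get(c) tested for
-- truthiness and then iterated is exactly iterating by.getD c [] (None iterates as []).
def pvHit (by_ : PySem.Dict Char (List String)) (emptyHit : Bool) (elem : String) : Bool :=
  if emptyHit then true
  else (List.range elem.toList.length).any (fun i =>
    (by_.getD (elem.toList.getD i ' ') []).any (fun p =>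
      PySem.Chars.startswith (elem.toList.drop i) p.toList))

def find_strings_in_list_alt (data_list : List String) (searching_strs : List String) : List String × List String :=
  let pats := (searching_strs.filter (fun s => !s.toList.isEmpty)).map
    (fun p => (p.toList.headD ' ', p))
  let emptyHit : Bool := pats.length != searching_strs.length
  let by_ := pats.foldl (fun d pp => d.modify pp.1 [] (· ++ [pp.2])) PySem.Dict.empty
  (data_list.filter (fun e => pvHit by_ emptyHit e),
   data_list.filter (fun e => !pvHit by_ emptyHit e))

-- ===== PRECONDITION & SPEC =====
def Spec_find_strings_in_list (data_list : List String) (searching_strs : List String) (out : List String × List String) : Prop := out = find_strings_in_list_alt data_list searching_strs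
instance (data_list : List String) (searching_strs : List String) (out : List String × List String) : Decidable (Spec_find_strings_in_list data_list searching_strs out) := by unfold Spec_find_strings_in_list; infer_instance

-- ===== CLAIM (what is proved, stated in full; the proofs are below) =====
def Claim_equal_find_strings_in_list : Prop := ∀ (data_list : List String) (searching_strs : List String), Dom_find_strings_in_list data_list searching_strs → Spec_find_strings_in_list data_list searching_strs (find_strings_in_list data_list searching_strs)

-- ===== LEMMAS AND PROOFS =====

-- the first-character guard is redundant: startswith at a valid offset forces it
lemma guard_and_startswith (s sub : List Char) (i : Nat) (_hi : i < s.length) (h : sub ≠ []) :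
    ((sub.headD ' ' == s.getD i ' ') && PySem.Chars.startswith (s.drop i) sub)
      = PySem.Chars.startswith (s.drop i) sub := by
  rcases hsw : PySem.Chars.startswith (s.drop i) sub with _ | _
  · simp
  · rw [PySem.Chars.startswith_iff] at hsw
    rcases sub with _ | ⟨c, cs⟩
    · exact absurd rfl h
    · obtain ⟨r, hr⟩ := hsw
      have hget : s[i]? = some c := by
        rw [← List.head?_drop, ← hr]
        rfl
      simp [List.getD_eq_getElem?_getD, hget]

-- positional-scan characterisation of `sub in s` for nonempty sub
lemma isIn_eq_range_scan (s sub : List Char) (h : sub ≠ []) :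
    PySem.Chars.isIn sub s =
      (List.range s.length).any (fun i => PySem.Chars.startswith (s.drop i) sub) := by
  rcases hb : PySem.Chars.isIn sub s with _ | _
  · symm
    rw [List.any_eq_false]
    intro i _
    simp only [← Bool.not_eq_true] at *
    intro hc
    rw [PySem.Chars.startswith_iff] at hc
    have : ∃ j, sub <+: s.drop j := ⟨i, hc⟩
    rw [PySem.Chars.exists_prefix_drop_iff_isIn] at this
    simp [hb] at this
  · symm
    rw [List.any_eq_true]
    have := (PySem.Chars.exists_prefix_drop_iff_isIn sub s).mpr hb
    obtain ⟨j, hj⟩ := this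
    have hjlt : j < s.length := by
      by_contra hge
      push Not at hge
      rw [List.drop_eq_nil_of_le hge] at hj
      exact h (List.prefix_nil.mp hj)
    exact ⟨j, List.mem_range.mpr hjlt, (PySem.Chars.startswith_iff _ _).mpr hj⟩

-- B's hit predicate agrees with A's `any(s in elem)`
lemma hit_eq (searching_strs : List String) (elem : String) :
    pvHit (((searching_strs.filter (fun s => !s.toList.isEmpty)).map (fun p => (p.toList.headD ' ', p))).foldl
            (fun d pp => d.modify pp.1 [] (· ++ [pp.2])) PySem.Dict.empty)
          (((searching_strs.filter (fun s => !s.toList.isEmpty)).map (fun p => (p.toList.headD ' ', p))).length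
            != searching_strs.length)
          elem
      = searching_strs.any (fun s => PySem.Str.isIn s elem) := by
  by_cases hE : ∃ s ∈ searching_strs, s.toList = []
  · obtain ⟨s, hs, hnil⟩ := hE
    have hlen : ((searching_strs.filter (fun s => !s.toList.isEmpty)).map
        (fun p => (p.toList.headD ' ', p))).length ≠ searching_strs.length := by
      rw [List.length_map]
      intro hlen
      have := (List.length_filter_eq_length_iff).mp hlen s hs
      simp [hnil] at this
    have hr : searching_strs.any (fun s => PySem.Str.isIn s elem) = true := by
      rw [List.any_eq_true]
      refine ⟨s, hs, ?_⟩
      simp only [PySem.Str.isIn_eq, hnil]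
      exact PySem.Chars.isIn_nil _
    have hb : (((searching_strs.filter (fun s => !s.toList.isEmpty)).map
        (fun p => (p.toList.headD ' ', p))).length != searching_strs.length) = true := by
      simpa using hlen
    simp only [pvHit, hb, if_true, hr]
  · push Not at hE
    have hfil : searching_strs.filter (fun s => !s.toList.isEmpty) = searching_strs := by
      rw [List.filter_eq_self]
      intro s hs
      simp [hE s hs]
    rw [hfil]
    -- the grouping dict looked up at c is exactly the c-bucket of the patterns, in order
    have hdict : ∀ c : Char,
        ((searching_strs.map (fun p => (p.toList.headD ' ', p))).foldl
            (fun d pp => d.modify pp.1 [] (· ++ [pp.2])) PySem.Dict.empty).getD c []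
          = ((searching_strs.map (fun p => (p.toList.headD ' ', p))).filter
              (fun pp => pp.1 == c)).map (fun pp => pp.2) := by
      intro c
      rw [PySem.Dict.getD_foldl_modify_append]
      simp [PySem.Dict.getD_empty]
    simp only [pvHit, List.length_map, bne_self_eq_false, if_neg Bool.false_ne_true, hdict,
      List.any_filter, List.any_map, Function.comp_def]
    rcases hr : searching_strs.any (fun s => PySem.Str.isIn s elem) with _ | _
    · rw [List.any_eq_false] at hr ⊢
      intro i hi hin
      rw [List.any_eq_true] at hin
      obtain ⟨p, hp, hguard⟩ := hin
      rw [guard_and_startswith _ _ _ (List.mem_range.mp hi) (hE p hp)] at hguard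
      have h2 := hr p hp
      rw [PySem.Str.isIn_eq, isIn_eq_range_scan _ _ (hE p hp)] at h2
      exact h2 (List.any_eq_true.mpr ⟨i, hi, hguard⟩)
    · rw [List.any_eq_true] at hr ⊢
      obtain ⟨p, hp, hin⟩ := hr
      rw [PySem.Str.isIn_eq, isIn_eq_range_scan _ _ (hE p hp), List.any_eq_true] at hin
      obtain ⟨i, hi, hsw⟩ := hin
      refine ⟨i, hi, List.any_eq_true.mpr ⟨p, hp, ?_⟩⟩
      rw [guard_and_startswith _ _ _ (List.mem_range.mp hi) (hE p hp)]
      exact hsw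

-- A's two-accumulator loop is the pair of filters
lemma foldl_partition (p : String → Bool) (dl : List String) (a b : List String) :
    dl.foldl
      (fun (acc : List String × List String) elem =>
        if p elem then (acc.1 ++ [elem], acc.2) else (acc.1, acc.2 ++ [elem]))
      (a, b)
      = (a ++ dl.filter p, b ++ dl.filter (fun e => !p e)) := by
  induction dl generalizing a b with
  | nil => simp
  | cons x xs ih =>
    by_cases hx : p x <;> simp [hx, ih, List.append_assoc]

-- ===== VERDICT (by name: the statement is the Claim_ definition above) =====
theorem find_strings_in_list_spec : Claim_equal_find_strings_in_list := by
  intro data_list searching_strs _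
  unfold Spec_find_strings_in_list find_strings_in_list find_strings_in_list_alt
  rw [foldl_partition]
  simp only [List.nil_append]
  have hf : ∀ e, (searching_strs.any fun s => PySem.Str.isIn s e)
      = pvHit (((searching_strs.filter (fun s => !s.toList.isEmpty)).map (fun p => (p.toList.headD ' ', p))).foldl
            (fun d pp => d.modify pp.1 [] (· ++ [pp.2])) PySem.Dict.empty)
          (((searching_strs.filter (fun s => !s.toList.isEmpty)).map (fun p => (p.toList.headD ' ', p))).length
            != searching_strs.length) e :=
    fun e => (hit_eq searching_strs e).symm
  simp only [Prod.mk.injEq]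
  exact ⟨List.filter_congr (fun e _ => hf e), List.filter_congr (fun e _ => by rw [hf e])⟩
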